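-- pv_equiv track=rewrite | github.com/cortega26/Varios | Array2.py | sortedStrings
-- ===== SOURCE A (Python) =====
-- def sortedStrings(N,A):
--   A.sort()
--   result=[]
--   for i in range(N):
--     partial=(A[i],A.count(A[i]))
--     result.append(partial)
--   res = []
--   [res.append(x) for x in result if x not in res]
--   return res
-- ===== SOURCE B (Python) =====
-- def sortedStrings(N, A):
--     A.sort()
--     res = []
--     i = 0
--     n = len(A)
--     while i < n:
--         j = i
--         while j < n and A[j] == A[i]:
--             j += 1
--         if i < N:
--             res.append((A[i], j - i))
--         i = j
--     return res
-- ===== Notes on version B (the rewrite author's own statement) =====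
-- stated objective: faster
-- what changed: A calls A.count (a full scan) for every index and then deduplicates with a quadratic 'x not in res' pass; B sorts once and does a single linear pass over the sorted list counting each consecutive run, appending a run's (value, length) when the run starts before index N.
import Mathlib
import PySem

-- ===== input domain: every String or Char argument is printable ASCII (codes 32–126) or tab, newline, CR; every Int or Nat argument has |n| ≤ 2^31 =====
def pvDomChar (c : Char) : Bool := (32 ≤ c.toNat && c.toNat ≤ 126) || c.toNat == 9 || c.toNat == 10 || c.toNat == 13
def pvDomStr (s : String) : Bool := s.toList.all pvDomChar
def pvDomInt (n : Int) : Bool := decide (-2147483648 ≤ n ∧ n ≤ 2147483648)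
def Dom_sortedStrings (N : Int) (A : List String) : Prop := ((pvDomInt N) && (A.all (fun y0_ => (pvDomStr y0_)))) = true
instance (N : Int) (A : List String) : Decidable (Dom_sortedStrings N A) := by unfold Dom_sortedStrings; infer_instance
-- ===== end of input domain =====

-- B replaces A's per-index A.count scan and quadratic 'x not in res' dedup by a single
-- linear pass over the sorted list that counts consecutive runs (objective: faster).
-- Both A and B sort the argument list in place in Python (same side effect); the
-- equivalence proved here is about the return value.

-- ===== PORT A =====
def sortedStrings (N : Int) (A : List String) : List (String × Int) :=
  let s := PySem.List.sorted A (fun x => x) false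
  let result := (PySem.List.pyRange 0 N 1).foldl
    (fun acc i => acc ++ [(PySem.List.pyGetD s i "", (PySem.List.count s (PySem.List.pyGetD s i "") : Int))])
    ([] : List (String × Int))
  result.foldl (fun res x => if x ∈ res then res else res ++ [x]) []

-- ===== PORT B =====
-- the outer while loop of Source B: at list position i, the inner while loop scans the
-- current run (takeWhile), the run is emitted if its start index i is < N, and the
-- scan resumes after the run (dropWhile)
def pvRunsB (N : Int) : List String → Int → List (String × Int)
  | [], _ => []
  | x :: rest, i =>
    let run := rest.takeWhile (fun y => y == x)
    (if i < N then [(x, (run.length : Int) + 1)] else []) ++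
      pvRunsB N (rest.dropWhile (fun y => y == x)) (i + run.length + 1)
termination_by l _ => l.length
decreasing_by simpa using Nat.lt_succ_of_le (List.length_dropWhile_le _ _)

def sortedStrings_alt (N : Int) (A : List String) : List (String × Int) :=
  pvRunsB N (PySem.List.sorted A (fun x => x) false) 0

-- ===== PRECONDITION & SPEC =====
-- Pre_ excludes exactly the inputs with N > len(A), on which A's A[i] raises IndexError.
def Pre_sortedStrings (N : Int) (A : List String) : Prop := N ≤ (A.length : Int)
instance (N : Int) (A : List String) : Decidable (Pre_sortedStrings N A) := by
  unfold Pre_sortedStrings; infer_instance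

def pvWitness_sortedStrings : Int × List String := (2, ["b", "a", "b"])

def Spec_sortedStrings (N : Int) (A : List String) (out : List (String × Int)) : Prop := out = sortedStrings_alt N A
instance (N : Int) (A : List String) (out : List (String × Int)) : Decidable (Spec_sortedStrings N A out) := by unfold Spec_sortedStrings; infer_instance

-- ===== CLAIM (what is proved, stated in full; the proofs are below) =====
def Claim_equal_sortedStrings : Prop := ∀ (N : Int) (A : List String), Dom_sortedStrings N A → Pre_sortedStrings N A → Spec_sortedStrings N A (sortedStrings N A)

-- ===== LEMMAS AND PROOFS =====

-- A's dedup loop, with an explicit accumulator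
def pvDed (l : List (String × Int)) (acc : List (String × Int)) : List (String × Int) :=
  l.foldl (fun res x => if x ∈ res then res else res ++ [x]) acc

lemma pvDed_skip (j : Nat) (p : String × Int) (M acc : List (String × Int)) (hp : p ∈ acc) :
    pvDed (List.replicate j p ++ M) acc = pvDed M acc := by
  induction j with
  | zero => simp
  | succ j ih =>
    have : List.replicate (j + 1) p ++ M = p :: (List.replicate j p ++ M) := by
      simp [List.replicate_succ]
    rw [this]
    simpa [pvDed, List.foldl, hp] using ih

lemma pvDed_head (b : String × Int) (M : List (String × Int)) (h : ∀ z ∈ M, z ≠ b) :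
    ∀ pre, pvDed M (b :: pre) = b :: pvDed M pre := by
  induction M with
  | nil => intro pre; simp [pvDed]
  | cons z M ih =>
    intro pre
    have hzb : z ≠ b := h z (by simp)
    have h' : ∀ w ∈ M, w ≠ b := fun w hw => h w (by simp [hw])
    by_cases hz : z ∈ pre
    · have h1 : pvDed (z :: M) (b :: pre) = pvDed M (b :: pre) := by
        simp [pvDed, List.foldl, hz, hzb]
      have h2 : pvDed (z :: M) pre = pvDed M pre := by
        simp [pvDed, List.foldl, hz]
      rw [h1, h2, ih h']
    · have : z ∈ b :: pre ↔ False := by simp [hzb, hz]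
      simp [pvDed, List.foldl, hz, hzb]
      simpa using ih h' (pre ++ [z])

-- shift lemma: pvRunsB only compares the running index with N
lemma pvRunsB_shift : ∀ (m : Nat) (l : List String), l.length ≤ m → ∀ (N i : Int),
    pvRunsB N l i = pvRunsB (N - i) l 0 := by
  intro m
  induction m with
  | zero =>
    intro l hl N i
    have : l = [] := List.length_eq_zero_iff.mp (Nat.le_zero.mp hl)
    simp [this, pvRunsB]
  | succ m ih =>
    intro l hl N i
    match l with
    | [] => simp [pvRunsB]
    | x :: rest =>
      rw [pvRunsB, pvRunsB]
      have ht : (rest.dropWhile (fun y => y == x)).length ≤ m := by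
        have := List.length_dropWhile_le (fun y => y == x) rest
        simp at hl; omega
      rw [ih _ ht N _, ih _ ht (N - i) _]
      have hiff : i < N ↔ (0 : Int) < N - i := by omega
      have harith : N - (i + ((rest.takeWhile (fun y => y == x)).length : Int) + 1) =
          N - i - (0 + ((rest.takeWhile (fun y => y == x)).length : Int) + 1) := by ring
      simp only [hiff, harith]

lemma pvRunsB_nonpos : ∀ (m : Nat) (l : List String), l.length ≤ m → ∀ (N : Int), N ≤ 0 →
    pvRunsB N l 0 = [] := by
  intro m
  induction m with
  | zero =>
    intro l hl N hN
    have : l = [] := by simpa using List.length_eq_zero_iff.mp (Nat.le_zero.mp hl)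
    simp [this, pvRunsB]
  | succ m ih =>
    intro l hl N hN
    match l with
    | [] => simp [pvRunsB]
    | x :: rest =>
      rw [pvRunsB]
      have ht : (rest.dropWhile (fun y => y == x)).length ≤ m := by
        have := List.length_dropWhile_le (fun y => y == x) rest
        simp at hl; omega
      rw [pvRunsB_shift m _ ht]
      have : ¬ ((0:Int) < N) := by omega
      simp only [this, if_false, List.nil_append]
      exact ih _ ht _ (by omega)

-- indexing the first n positions of a list is its n-prefix
lemma pvRangeGetD_take (s : List String) (n : Nat) (hn : n ≤ s.length) :
    (List.range n).map (fun k => s.getD k "") = s.take n := by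
  apply List.ext_getElem
  · simp [hn]
  · intro i h1 h2
    simp only [List.getElem_map, List.getElem_range, List.getElem_take]
    have : i < s.length := by simp at h2; omega
    simp [List.getD_eq_getElem?_getD, List.getElem?_eq_getElem this]

-- the main run lemma, on any ≤-sorted list
lemma pvMain : ∀ (m : Nat) (l : List String), l.length ≤ m → l.Pairwise (· ≤ ·) →
    ∀ n : Nat, n ≤ l.length →
    pvDed ((l.take n).map (fun z => (z, (l.count z : Int)))) [] = pvRunsB (n : Int) l 0 := by
  intro m
  induction m with
  | zero =>
    intro l hl _ n hn
    have hl0 : l = [] := List.length_eq_zero_iff.mp (Nat.le_zero.mp hl)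
    subst hl0
    have hn0 : n = 0 := by simpa using hn
    subst hn0
    simp [pvDed, pvRunsB]
  | succ m ih =>
    intro l hl hp n hn
    match l with
    | [] =>
      have hn0 : n = 0 := by simpa using hn
      subst hn0
      simp [pvDed, pvRunsB]
    | x :: rest =>
      rcases Nat.eq_zero_or_pos n with hn0 | hnpos
      · subst hn0
        simp only [List.take_zero, List.map_nil, Nat.cast_zero]
        rw [pvRunsB_nonpos (m+1) _ hl 0 (by omega)]
        simp [pvDed]
      · -- notation
        set q : String → Bool := fun y => y == x with hq
        set k := (rest.takeWhile q).length with hk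
        set t := rest.dropWhile q with htdef
        have hrepl : rest.takeWhile q = List.replicate k x := by
          rw [List.eq_replicate_iff]
          refine ⟨rfl, fun b hb => ?_⟩
          have := List.mem_takeWhile_imp hb
          simpa [hq] using this
        have hdecomp : x :: rest = List.replicate (k+1) x ++ t := by
          rw [List.replicate_succ, List.cons_append]
          congr 1
          rw [← hrepl]
          exact (List.takeWhile_append_dropWhile (p := q) (l := rest)).symm
        have hlen : rest.length = k + t.length := by
          conv_lhs => rw [← List.takeWhile_append_dropWhile (p := q) (l := rest)]
          rw [List.length_append]
        have hprest : rest.Pairwise (· ≤ ·) := (List.pairwise_cons.mp hp).2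
        have hxrest : ∀ y ∈ rest, x ≤ y := (List.pairwise_cons.mp hp).1
        have hpt : t.Pairwise (· ≤ ·) := hprest.sublist (List.dropWhile_sublist q)
        have hxt : x ∉ t := by
          intro hmem
          have hne : t ≠ [] := by intro h; rw [h] at hmem; simp at hmem
          have hy : q (t.head hne) = false := List.head_dropWhile_not q hne
          have hyx : t.head hne ≠ x := by simpa [hq] using hy
          have hymem : t.head hne ∈ rest := (List.dropWhile_sublist q).mem (List.head_mem hne)
          have hxy : x < t.head hne := lt_of_le_of_ne (hxrest _ hymem) (Ne.symm hyx)
          have hcons : t.head hne :: t.tail = t := List.cons_head_tail hne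
          rw [← hcons] at hmem
          rcases List.mem_cons.mp hmem with h1 | h1
          · exact hyx h1.symm
          · have hyz : t.head hne ≤ x := by
              have hpt' := hpt
              rw [← hcons] at hpt'
              exact (List.pairwise_cons.mp hpt').1 x h1
            exact absurd (lt_of_lt_of_le hxy hyz) (lt_irrefl x)
        have hcx : (x :: rest).count x = k + 1 := by
          rw [hdecomp, List.count_append, List.count_replicate_self,
              List.count_eq_zero.mpr hxt]
        have hcz : ∀ z ∈ t, (x :: rest).count z = t.count z := by
          intro z hz
          have hzx : z ≠ x := fun h => hxt (h ▸ hz)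
          rw [hdecomp, List.count_append, List.count_replicate]
          rw [if_neg (by simpa using hzx.symm)]
          omega
        have htake : (x :: rest).take n =
            List.replicate (min n (k+1)) x ++ t.take (n - (k+1)) := by
          rw [hdecomp, List.take_append, List.take_replicate, List.length_replicate]
        -- the mapped prefix
        have hmapr : (List.replicate (min n (k+1)) x).map
            (fun z => (z, ((x :: rest).count z : Int))) =
            List.replicate (min n (k+1)) (x, ((k : Int) + 1)) := by
          rw [List.map_replicate, hcx]
          norm_cast
        set M := (t.take (n - (k+1))).map (fun z => (z, ((x :: rest).count z : Int))) with hM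
        have hMt : M = (t.take (n - (k+1))).map (fun z => (z, (t.count z : Int))) := by
          apply List.map_congr_left
          intro z hz
          rw [hcz z (List.mem_of_mem_take hz)]
        have hMne : ∀ z ∈ M, z ≠ (x, ((k : Int) + 1)) := by
          intro z hz
          rw [hM] at hz
          rcases List.mem_map.mp hz with ⟨w, hw, hwz⟩
          have hwt : w ∈ t := List.mem_of_mem_take hw
          have : w ≠ x := fun h => hxt (h ▸ hwt)
          intro hcontra
          rw [← hwz] at hcontra
          exact this (congrArg Prod.fst hcontra)
        -- LHS
        have hL : pvDed (((x :: rest).take n).map (fun z => (z, ((x :: rest).count z : Int)))) [] =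
            (x, ((k : Int) + 1)) :: pvDed M [] := by
          rw [htake, List.map_append, hmapr]
          have hmin : min n (k+1) = (min n (k+1) - 1) + 1 := by omega
          rw [hmin, List.replicate_succ, List.cons_append]
          have step1 : pvDed ((x, ((k : Int) + 1)) :: (List.replicate (min n (k+1) - 1) (x, ((k : Int) + 1)) ++ M)) [] =
              pvDed (List.replicate (min n (k+1) - 1) (x, ((k : Int) + 1)) ++ M) [(x, ((k : Int) + 1))] := by
            simp [pvDed, List.foldl]
          rw [step1, pvDed_skip _ _ _ _ (by simp), pvDed_head _ _ hMne]
        rw [hL]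
        -- RHS
        rw [pvRunsB]
        simp only [← hq, ← hk, ← htdef]
        have ht' : t.length ≤ m := by
          simp only [List.length_cons] at hl
          omega
        rw [pvRunsB_shift m t ht' (n : Int) (0 + (k : Int) + 1)]
        have hcond : (0 : Int) < (n : Int) := by exact_mod_cast hnpos
        rw [if_pos hcond]
        have harith : (n : Int) - (0 + (k : Int) + 1) = (n : Int) - ((k : Int) + 1) := by ring
        rw [harith]
        simp only [List.cons_append, List.nil_append]
        congr 1
        -- tail
        rcases Nat.lt_or_ge n (k+1) with hcase | hcase
        · have hM0 : M = [] := by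
            rw [hM]
            have : n - (k+1) = 0 := by omega
            simp [this]
          rw [hM0, pvRunsB_nonpos m t ht' _ (by omega)]
          simp [pvDed]
        · have hsub : ((n : Int) - ((k : Int) + 1)) = ((n - (k+1) : Nat) : Int) := by
            omega
          rw [hsub, hMt, ← ih t ht' hpt (n - (k+1)) (by simp only [List.length_cons] at hn; omega)]


-- ===== VERDICT (by name: the statement is the Claim_ definition above) =====
theorem sortedStrings_spec : Claim_equal_sortedStrings := by
  intro N A _ hPre
  unfold Spec_sortedStrings sortedStrings sortedStrings_alt
  simp only []
  rw [PySem.List.foldl_append_singleton_eq_map]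
  rw [List.nil_append]
  set s := PySem.List.sorted A (fun x => x) false with hs
  have hslen : s.length = A.length := PySem.List.length_sorted A _ false
  have hsp : s.Pairwise (· ≤ ·) := PySem.List.sorted_pairwise A (fun x => x)
  by_cases hN : N ≤ 0
  · rw [PySem.List.pyRange_one_eq_nil hN, List.map_nil]
    rw [pvRunsB_nonpos s.length s le_rfl N hN]
    rfl
  · push Not at hN
    set n := N.toNat with hn
    have hNn : N = (n : Int) := by omega
    have hnlen : n ≤ s.length := by
      rw [hslen]
      unfold Pre_sortedStrings at hPre
      omega
    have hmap2 : (List.range n).map (fun (k : Nat) => (PySem.List.pyGetD s (k : Int) "", (PySem.List.count s (PySem.List.pyGetD s (k : Int) "") : Int))) =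
        (s.take n).map (fun z => (z, (s.count z : Int))) := by
      rw [← pvRangeGetD_take s n hnlen, List.map_map]
      apply List.map_congr_left
      intro k _
      simp [PySem.List.pyGetD_natCast, PySem.List.count_eq]
    rw [hNn, PySem.List.pyRange_zero_natCast, List.map_map]
    simp only [Function.comp_def]
    rw [hmap2]
    exact pvMain s.length s le_rfl hsp n hnlen
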